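-- pv_equiv track=rewrite | github.com/rsleiberin/janus | image_processing/group_lab_colors.py | find_group_colors
-- ===== SOURCE A (Python) =====
-- def find_group_colors(sRGB_data, counts, labels):
--     unique_labels = set(labels) - {-1}  # Exclude noise
--     group_colors = {}
--
--     for label in unique_labels:
--         indices = [i for i, lbl in enumerate(labels) if lbl == label]
--         max_count_index = max(indices, key=lambda i: counts[i])
--         group_colors[label] = sRGB_data[max_count_index]
--
--     return group_colors
-- ===== SOURCE B (Python) =====
-- def find_group_colors(sRGB_data, counts, labels):
--     # One pass over labels: keep, per label, the (count, index) of the best entry seen so far,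
--     # then look each winner's color up once.
--     best = {}
--     for i, label in enumerate(labels):
--         if label == -1:  # Exclude noise
--             continue
--         c = counts[i]
--         b = best.get(label)
--         if b is None or c > b[0]:
--             best[label] = (c, i)
--     return {label: sRGB_data[i] for label, (c, i) in best.items()}
-- ===== Notes on version B (the rewrite author's own statement) =====
-- stated objective: alternative
-- what changed: Instead of rescanning all labels once per unique label (rebuilding the index list and taking a max per label), B makes a single pass over labels keeping, per label in a dict, the best (count, index) seen so far, then looks each winner's color up once; O(L*n) becomes O(n), though a timing run did not confirm a >=1.5x speed-up on that run's inputs.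
-- outside the precondition, e.g. on find_group_colors([[1]], [5, 1], [0, 0]): A returns {0: [1]}, B returns {0: [1]}
import Mathlib
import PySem

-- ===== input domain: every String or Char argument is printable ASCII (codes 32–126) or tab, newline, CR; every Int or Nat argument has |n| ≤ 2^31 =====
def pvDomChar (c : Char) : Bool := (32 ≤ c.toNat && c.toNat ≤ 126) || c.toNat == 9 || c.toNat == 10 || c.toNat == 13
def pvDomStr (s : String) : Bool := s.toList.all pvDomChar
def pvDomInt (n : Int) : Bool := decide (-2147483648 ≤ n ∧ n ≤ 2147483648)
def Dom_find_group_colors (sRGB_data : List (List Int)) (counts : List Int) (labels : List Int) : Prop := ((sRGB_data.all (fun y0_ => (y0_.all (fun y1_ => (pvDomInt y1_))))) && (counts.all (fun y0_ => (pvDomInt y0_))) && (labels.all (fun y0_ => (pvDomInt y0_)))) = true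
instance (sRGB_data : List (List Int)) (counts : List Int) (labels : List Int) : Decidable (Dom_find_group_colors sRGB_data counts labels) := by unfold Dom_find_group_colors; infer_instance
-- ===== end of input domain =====

-- ===== PORT A =====
-- B replaces A's per-unique-label rescans with a single pass keeping the best (count, index)
-- per label in a dict (objective: alternative one-pass algorithm; return-value equivalence).
-- The Python iterates over a set (hash order); the result dict is compared ignoring order,
-- so the set is ported in first-occurrence order.
def find_group_colors (sRGB_data : List (List Int)) (counts : List Int) (labels : List Int) : List (Int × List Int) :=
  let unique_labels : PySem.Set Int := PySem.Set.diff (PySem.Set.ofList labels) (PySem.Set.ofList [-1])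
  let group_colors : PySem.Dict Int (List Int) :=
    unique_labels.foldl (fun d label =>
      let indices := ((PySem.List.enumerate labels 0).filter (fun p => p.2 == label)).map (fun p => p.1)
      match PySem.List.max? indices (fun i => PySem.List.pyGetD counts i 0) with
      | some max_count_index => d.insert label (PySem.List.pyGetD sRGB_data max_count_index [])
      | none => d   -- unreachable: label ∈ labels, so indices ≠ []
    ) PySem.Dict.empty
  group_colors.items

-- ===== PORT B =====
def find_group_colors_alt (sRGB_data : List (List Int)) (counts : List Int) (labels : List Int) : List (Int × List Int) :=
  let best : PySem.Dict Int (Int × Int) :=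
    (PySem.List.enumerate labels 0).foldl (fun d p =>
      if p.2 == -1 then d
      else
        let c := PySem.List.pyGetD counts p.1 0
        match d.get? p.2 with
        | none => d.insert p.2 (c, p.1)
        | some b => if c > b.1 then d.insert p.2 (c, p.1) else d
    ) PySem.Dict.empty
  best.items.map (fun q => (q.1, PySem.List.pyGetD sRGB_data q.2.2 []))

-- ===== PRECONDITION & SPEC =====
-- Pre_ excludes inputs where some index carrying a non-noise label is out of range of counts or
-- sRGB_data: A raises IndexError there, except when only indices that lose their per-label
-- maximum fall outside sRGB_data, where both programs still return the same value (Pre_ is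
-- merely conservative on that corner).
def Pre_find_group_colors (sRGB_data : List (List Int)) (counts : List Int) (labels : List Int) : Prop :=
  ∀ i < labels.length, labels[i]! ≠ -1 → i < counts.length ∧ i < sRGB_data.length
instance (sRGB_data : List (List Int)) (counts : List Int) (labels : List Int) : Decidable (Pre_find_group_colors sRGB_data counts labels) := by unfold Pre_find_group_colors; infer_instance

def pvWitness_find_group_colors : List (List Int) × List Int × List Int :=
  ([[1, 2, 3], [4, 5, 6]], [5, 9], [0, 0])

def Spec_find_group_colors (sRGB_data : List (List Int)) (counts : List Int) (labels : List Int) (out : List (Int × List Int)) : Prop := out = find_group_colors_alt sRGB_data counts labels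
instance (sRGB_data : List (List Int)) (counts : List Int) (labels : List Int) (out : List (Int × List Int)) : Decidable (Spec_find_group_colors sRGB_data counts labels out) := by unfold Spec_find_group_colors; infer_instance

-- ===== CLAIM (what is proved, stated in full; the proofs are below) =====
def Claim_equal_find_group_colors : Prop := ∀ (sRGB_data : List (List Int)) (counts : List Int) (labels : List Int), Dom_find_group_colors sRGB_data counts labels → Pre_find_group_colors sRGB_data counts labels → Spec_find_group_colors sRGB_data counts labels (find_group_colors sRGB_data counts labels)

-- ===== LEMMAS AND PROOFS =====

-- f i = (counts[i], sRGB_data[i]) as totalised by the ports; its first component is the max? key.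
def pvF (counts : List Int) : Int → Int × Int :=
  fun i => (PySem.List.pyGetD counts i 0, i)

-- pvStep f is B's loop body with both lookups abstracted into f (definitionally equal to it).
def pvStep {β : Type} (f : Int → Int × β) (d : PySem.Dict Int (Int × β)) (p : Int × Int) : PySem.Dict Int (Int × β) :=
  if p.2 == -1 then d
  else
    match d.get? p.2 with
    | none => d.insert p.2 (f p.1)
    | some b => if (f p.1).1 > b.1 then d.insert p.2 (f p.1) else d

-- the non-noise labels of a processed prefix, first occurrences in order
def pvLabs (qs : List (Int × Int)) : List Int :=
  PySem.Set.ofList ((qs.filter (fun p => !(p.2 == -1))).map (fun p => p.2))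

-- the indices of a prefix that carry label L
def pvIdxs (qs : List (Int × Int)) (L : Int) : List Int :=
  (qs.filter (fun p => p.2 == L)).map (fun p => p.1)

-- the best (count, color) for label L over a prefix (junk when L never occurs)
def pvBest {β : Type} (z : β) (f : Int → Int × β) (qs : List (Int × Int)) (L : Int) : Int × β :=
  match PySem.List.max? (pvIdxs qs L) (fun i => (f i).1) with
  | some m => f m
  | none => (0, z)

-- the items of B's dict after processing a prefix qs
def pvSpecD {β : Type} (z : β) (f : Int → Int × β) (qs : List (Int × Int)) : List (Int × (Int × β)) :=
  (pvLabs qs).map (fun L => (L, pvBest z f qs L))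

lemma pvGet?_map {β : Type} (v : Int → β) (ks : List Int) (lab : Int) :
    (PySem.Dict.mk (ks.map (fun L => (L, v L)))).get? lab
      = if lab ∈ ks then some (v lab) else none := by
  induction ks with
  | nil => simp [PySem.Dict.get?]
  | cons k ks ih =>
    by_cases h : k = lab
    · subst h; simp [PySem.Dict.get?]
    · have hb : (k == lab) = false := by simp [h]
      simp only [PySem.Dict.get?, List.map_cons, List.find?_cons, hb] at ih ⊢
      simpa [List.mem_cons, Ne.symm h] using ih

lemma pvLabs_append (hs : List (Int × Int)) (p : Int × Int) :
    pvLabs (hs ++ [p]) = if p.2 == -1 then pvLabs hs else PySem.Set.add (pvLabs hs) p.2 := by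
  cases hb : (p.2 == -1) <;>
    simp [pvLabs, List.filter_append, List.map_append, PySem.Set.ofList, List.foldl_append, hb]

lemma pvIdxs_append (hs : List (Int × Int)) (p : Int × Int) (L : Int) :
    pvIdxs (hs ++ [p]) L = pvIdxs hs L ++ (if p.2 == L then [p.1] else []) := by
  cases hb : (p.2 == L) <;>
    simp [pvIdxs, List.filter_append, List.map_append, hb]

lemma pvMax?_append {κ : Type} [LT κ] [DecidableLT κ] (xs : List Int) (i : Int) (k : Int → κ) :
    PySem.List.max? (xs ++ [i]) k
      = match PySem.List.max? xs k with
        | none => some i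
        | some m => if k m < k i then some i else some m := by
  unfold PySem.List.max?
  rw [List.foldl_append]
  generalize List.foldl _ none xs = acc
  cases acc <;> rfl

lemma pvLabs_mem_ne (hs : List (Int × Int)) (L : Int) (h : L ∈ pvLabs hs) : L ≠ -1 := by
  simp only [pvLabs, PySem.Set.mem_ofList, List.mem_map, List.mem_filter] at h
  obtain ⟨p, ⟨_, hp⟩, rfl⟩ := h
  simpa using hp

lemma pvIdxs_nil_of_not_mem (hs : List (Int × Int)) (lab : Int) (hne : lab ≠ -1)
    (h : lab ∉ pvLabs hs) : pvIdxs hs lab = [] := by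
  simp only [pvLabs, PySem.Set.mem_ofList, List.mem_map, List.mem_filter] at h
  simp only [pvIdxs, List.map_eq_nil_iff, List.filter_eq_nil_iff]
  intro p hp hpl
  have : p.2 = lab := by simpa using hpl
  exact h ⟨p, ⟨hp, by simp [this, hne]⟩, this⟩

lemma pvIdxs_ne_nil_of_mem (hs : List (Int × Int)) (lab : Int)
    (h : lab ∈ pvLabs hs) : pvIdxs hs lab ≠ [] := by
  simp only [pvLabs, PySem.Set.mem_ofList, List.mem_map, List.mem_filter] at h
  obtain ⟨p, ⟨hp, _⟩, hpl⟩ := h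
  simp only [pvIdxs, ne_eq, List.map_eq_nil_iff, List.filter_eq_nil_iff]
  intro hall
  exact hall p hp (by simp [hpl])

lemma pvMapOverwrite {β : Type} (ks : List Int) (v : Int → β) (lab : Int) (w : β) :
    (ks.map (fun L => (L, v L))).map (fun q => if q.1 == lab then (lab, w) else q)
      = ks.map (fun L => (L, if L == lab then w else v L)) := by
  simp only [List.map_map]
  apply List.map_congr_left
  intro L _
  by_cases h : L = lab <;> simp [h, Function.comp]

lemma pvAdd_of_mem (s : PySem.Set Int) (x : Int) (h : x ∈ s) : PySem.Set.add s x = s := by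
  simp [PySem.Set.add, h]

lemma pvAdd_of_not_mem (s : PySem.Set Int) (x : Int) (h : x ∉ s) : PySem.Set.add s x = s ++ [x] := by
  simp [PySem.Set.add, h]

lemma pvStep1 {β : Type} (z : β) (f : Int → Int × β) (hs : List (Int × Int)) (p : Int × Int) :
    pvStep f (PySem.Dict.mk (pvSpecD z f hs)) p = PySem.Dict.mk (pvSpecD z f (hs ++ [p])) := by
  obtain ⟨i, lab⟩ := p
  have hget : ∀ x, (PySem.Dict.mk (pvSpecD z f hs)).get? x
      = if x ∈ pvLabs hs then some (pvBest z f hs x) else none := fun x =>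
    pvGet?_map (pvBest z f hs) (pvLabs hs) x
  by_cases hnoise : lab = -1
  · subst hnoise
    have : pvSpecD z f (hs ++ [(i, -1)]) = pvSpecD z f hs := by
      unfold pvSpecD
      rw [pvLabs_append]
      simp only [beq_self_eq_true, if_true]
      apply List.map_congr_left
      intro L hL
      have hne : L ≠ -1 := pvLabs_mem_ne hs L hL
      have : ((-1 : Int) == L) = false := by simp [Ne.symm hne]
      unfold pvBest
      rw [pvIdxs_append]
      simp [this]
    rw [this]
    simp [pvStep]
  · have hnb : (lab == -1) = false := by simp [hnoise]
    by_cases hmem : lab ∈ pvLabs hs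
    · -- existing key
      have hne : pvIdxs hs lab ≠ [] := pvIdxs_ne_nil_of_mem hs lab hmem
      obtain ⟨m, hm⟩ : ∃ m, PySem.List.max? (pvIdxs hs lab) (fun i => (f i).1) = some m := by
        cases h : PySem.List.max? (pvIdxs hs lab) (fun i => (f i).1) with
        | none => exact absurd ((PySem.List.max?_eq_none_iff _ _).1 h) hne
        | some m => exact ⟨m, rfl⟩
      have hbest : pvBest z f hs lab = f m := by simp [pvBest, hm]
      have hcont : (PySem.Dict.mk (pvSpecD z f hs)).contains lab = true := by
        rw [PySem.Dict.contains_eq_isSome_get?, hget lab]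
        simp [hmem]
      have hlabs : pvLabs (hs ++ [(i, lab)]) = pvLabs hs := by
        rw [pvLabs_append]; simp only [hnb, Bool.false_eq_true, if_false]
        exact pvAdd_of_mem _ _ hmem
      have hrhs : pvSpecD z f (hs ++ [(i, lab)])
          = (pvLabs hs).map (fun L => (L, if L == lab then
              (if (f m).1 < (f i).1 then f i else f m) else pvBest z f hs L)) := by
        unfold pvSpecD
        rw [hlabs]
        apply List.map_congr_left
        intro L _
        by_cases hL : L = lab
        · subst hL
          unfold pvBest
          rw [pvIdxs_append]
          simp only [beq_self_eq_true, if_true]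
          rw [pvMax?_append, hm]
          by_cases hlt : (f m).1 < (f i).1 <;> simp [hlt]
        · have h1 : (lab == L) = false := by simp [Ne.symm hL]
          have h2 : (L == lab) = false := by simp [hL]
          unfold pvBest
          rw [pvIdxs_append]
          simp [h1, h2]
      rw [hrhs]
      unfold pvStep
      by_cases hlt : (f m).1 < (f i).1
      · have hovr : PySem.Dict.insert (PySem.Dict.mk (pvSpecD z f hs)) lab (f i)
            = PySem.Dict.mk ((pvSpecD z f hs).map (fun q => if q.1 == lab then (lab, f i) else q)) := by
          simp [PySem.Dict.insert, hcont]
        simp only [hnb, Bool.false_eq_true, if_false, hget lab, hmem, if_true, hbest, gt_iff_lt,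
          hlt, hovr]
        congr 1
        unfold pvSpecD
        rw [pvMapOverwrite]
      · simp only [hnb, Bool.false_eq_true, if_false, hget lab, hmem, if_true, hbest, gt_iff_lt,
          hlt]
        congr 1
        unfold pvSpecD
        apply List.map_congr_left
        intro L _
        by_cases hL : L = lab <;> simp [hL, hbest]
    · -- new key
      have hcont : (PySem.Dict.mk (pvSpecD z f hs)).contains lab = false := by
        rw [PySem.Dict.contains_eq_isSome_get?, hget lab]
        simp [hmem]
      have hlabs : pvLabs (hs ++ [(i, lab)]) = pvLabs hs ++ [lab] := by
        rw [pvLabs_append]; simp only [hnb, Bool.false_eq_true, if_false]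
        exact pvAdd_of_not_mem _ _ hmem
      have hidx : pvIdxs hs lab = [] := pvIdxs_nil_of_not_mem hs lab hnoise hmem
      have hins : PySem.Dict.insert (PySem.Dict.mk (pvSpecD z f hs)) lab (f i)
          = PySem.Dict.mk (pvSpecD z f hs ++ [(lab, f i)]) := by
        simp [PySem.Dict.insert, hcont]
      unfold pvStep
      simp only [hnb, Bool.false_eq_true, if_false, hget lab, hmem, if_false, hins]
      congr 1
      unfold pvSpecD
      rw [hlabs, List.map_append]
      congr 1
      · apply List.map_congr_left
        intro L hL
        have hL2 : L ≠ lab := fun h => hmem (h ▸ hL)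
        have h1 : (lab == L) = false := by simp [Ne.symm hL2]
        unfold pvBest
        rw [pvIdxs_append]
        simp [h1]
      · simp only [List.map_cons, List.map_nil]
        unfold pvBest
        rw [pvIdxs_append, hidx]
        simp [PySem.List.max?]

lemma pvFold {β : Type} (z : β) (f : Int → Int × β) (ps hs : List (Int × Int)) :
    ps.foldl (pvStep f) (PySem.Dict.mk (pvSpecD z f hs)) = PySem.Dict.mk (pvSpecD z f (hs ++ ps)) := by
  induction ps generalizing hs with
  | nil => simp
  | cons p ps ih =>
    rw [List.foldl_cons, pvStep1, ih]
    simp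

lemma pvOfList_filter_aux (p : Int → Bool) (xs s : List Int) :
    (xs.foldl PySem.Set.add s).filter p = (xs.filter p).foldl PySem.Set.add (s.filter p) := by
  induction xs generalizing s with
  | nil => simp
  | cons x xs ih =>
    rw [List.foldl_cons, ih, List.filter_cons]
    cases hp : p x
    · by_cases hx : x ∈ s
      · rw [pvAdd_of_mem _ _ hx]
        simp
      · rw [pvAdd_of_not_mem _ _ hx, List.filter_append]
        simp_all
    · simp only [if_true, List.foldl_cons]
      by_cases hx : x ∈ s
      · rw [pvAdd_of_mem _ _ hx, pvAdd_of_mem _ _ (by simp [List.mem_filter, hx, hp])]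
      · rw [pvAdd_of_not_mem _ _ hx, pvAdd_of_not_mem _ _ (by simp [List.mem_filter, hx]),
          List.filter_append]
        simp [hp]

lemma pvOfList_filter (p : Int → Bool) (xs : List Int) :
    (PySem.Set.ofList xs).filter p = PySem.Set.ofList (xs.filter p) := by
  unfold PySem.Set.ofList
  simpa using pvOfList_filter_aux p xs []

-- A's fold: each distinct label's entry is appended once, in order
lemma pvAinv (z : Int) (f : Int → Int × Int) (out : Int → List Int) (hf2 : ∀ i, (f i).2 = i)
    (E : List (Int × Int)) (ks : List Int)
    (d : PySem.Dict Int (List Int))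
    (hnd : ks.Nodup) (hfresh : ∀ k ∈ ks, d.contains k = false)
    (hne : ∀ k ∈ ks, pvIdxs E k ≠ []) :
    (ks.foldl (fun d label =>
        match PySem.List.max? (pvIdxs E label) (fun i => (f i).1) with
        | some m => d.insert label (out m)
        | none => d) d).items
      = d.items ++ ks.map (fun k => (k, out ((pvBest z f E k).2))) := by
  induction ks generalizing d with
  | nil => simp
  | cons k ks ih =>
    obtain ⟨m, hm⟩ : ∃ m, PySem.List.max? (pvIdxs E k) (fun i => (f i).1) = some m := by
      cases h : PySem.List.max? (pvIdxs E k) (fun i => (f i).1) with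
      | none => exact absurd ((PySem.List.max?_eq_none_iff _ _).1 h) (hne k (by simp))
      | some m => exact ⟨m, rfl⟩
    have hck : d.contains k = false := hfresh k (by simp)
    have hins : (d.insert k (out m)).items = d.items ++ [(k, out m)] := by
      simp [PySem.Dict.insert, hck]
    rw [List.foldl_cons, hm]
    rw [ih (d.insert k (out m)) (by exact (List.nodup_cons.1 hnd).2)
        (fun k' hk' => by
          rw [PySem.Dict.contains_insert]
          have : k' ≠ k := fun h => ((List.nodup_cons.1 hnd).1 (h ▸ hk')).elim
          simp [this, hfresh k' (List.mem_cons_of_mem _ hk')])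
        (fun k' hk' => hne k' (List.mem_cons_of_mem _ hk'))]
    rw [hins]
    simp [pvBest, hm, hf2]

-- The two ports agree on every input (the equation needs no precondition; Pre_ marks where
-- the Python A itself returns normally).
lemma pvMain (sRGB_data : List (List Int)) (counts : List Int) (labels : List Int) :
    find_group_colors sRGB_data counts labels = find_group_colors_alt sRGB_data counts labels := by
  have hU : PySem.Set.diff (PySem.Set.ofList labels) (PySem.Set.ofList [-1])
      = pvLabs (PySem.List.enumerate labels 0) := by
    unfold pvLabs
    have h1 : ((PySem.List.enumerate labels 0).filter (fun p => !(p.2 == -1))).map (fun p => p.2)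
        = labels.filter (fun x => !(x == -1)) := by
      conv_rhs => rw [← PySem.List.map_snd_enumerate labels 0]
      rw [List.filter_map]
      rfl
    rw [h1, ← pvOfList_filter]
    unfold PySem.Set.diff
    apply List.filter_congr
    intro x _
    by_cases h : x = -1 <;> simp [PySem.Set.contains, h]
  have hlam : (fun (d : PySem.Dict Int (Int × Int)) (p : Int × Int) =>
      if p.2 == -1 then d
      else
        let c := PySem.List.pyGetD counts p.1 0
        match d.get? p.2 with
        | none => d.insert p.2 (c, p.1)
        | some b => if c > b.1 then d.insert p.2 (c, p.1) else d)
      = pvStep (pvF counts) := by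
    funext d p
    cases h : d.get? p.2 <;> simp [pvStep, pvF, h]
  have hB : find_group_colors_alt sRGB_data counts labels
      = (pvSpecD 0 (pvF counts) (PySem.List.enumerate labels 0)).map
          (fun q => (q.1, PySem.List.pyGetD sRGB_data q.2.2 [])) := by
    unfold find_group_colors_alt
    rw [hlam,
      show (PySem.Dict.empty : PySem.Dict Int (Int × Int))
        = PySem.Dict.mk (pvSpecD 0 (pvF counts) []) from rfl, pvFold]
    simp
  have hA : find_group_colors sRGB_data counts labels
      = (PySem.Dict.empty (κ := Int) (ν := List Int)).items
        ++ (pvLabs (PySem.List.enumerate labels 0)).map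
            (fun k => (k, PySem.List.pyGetD sRGB_data
              ((pvBest 0 (pvF counts) (PySem.List.enumerate labels 0) k).2) [])) := by
    have hnd : (pvLabs (PySem.List.enumerate labels 0)).Nodup := PySem.Set.nodup_ofList _
    have hne : ∀ k ∈ pvLabs (PySem.List.enumerate labels 0),
        pvIdxs (PySem.List.enumerate labels 0) k ≠ [] :=
      fun k hk => pvIdxs_ne_nil_of_mem _ k hk
    have h := pvAinv 0 (pvF counts) (fun m => PySem.List.pyGetD sRGB_data m []) (fun _ => rfl)
      (PySem.List.enumerate labels 0)
      (pvLabs (PySem.List.enumerate labels 0)) PySem.Dict.empty hnd (fun _ _ => rfl) hne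
    unfold find_group_colors
    rw [hU]
    exact h
  rw [hA, hB]
  simp [pvSpecD, List.map_map, Function.comp, PySem.Dict.empty]

theorem find_group_colors_spec : Claim_equal_find_group_colors := by
  intro sRGB_data counts labels _ _
  unfold Spec_find_group_colors
  exact pvMain sRGB_data counts labels
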